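-- pv_equiv track=rewrite | github.com/skenny/adventofcode | 2025/day7.py | build_universes
-- ===== SOURCE A (Python) =====
-- def build_universes(input, row, col, universes):
--     if row < len(input):
--         row_str = input[row]
--         node = row_str[col]
--         if node == '^':
--             # go left
--             new_universe = input[:]
--             new_universe[row] = row_str[:col] + "/" + row_str[col + 1:]
--             if row + 1 < len(input):
--                 build_universes(new_universe, row+1, col-1, universes)
--             else:
--                 universes.append(new_universe)
--             # go right
--             new_universe = input[:]
--             new_universe[row] = row_str[:col] + "\\" + row_str[col + 1:]
--             if row + 1 < len(input):
--                 build_universes(new_universe, row+1, col+1, universes)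
--             else:
--                 universes.append(new_universe)
--         else:
--             # go straight
--             new_universe = input.copy()
--             new_universe[row] = row_str[:col] + "|" + row_str[col + 1:]
--             if row + 1 < len(input):
--                 build_universes(new_universe, row+1, col, universes)
--             else:
--                 universes.append(new_universe)
--     return universes
-- ===== SOURCE B (Python) =====
-- def build_universes(input, row, col, universes):
--     # Iterative re-implementation: explicit LIFO stack of (grid, row, col) frames
--     # instead of recursion; the left branch is pushed last so it is processed first,
--     # reproducing A's left-before-right preorder exactly (including Python's negative
--     # index wraparound, which both implementations apply identically).
--     stack = [(input, row, col)]
--     while stack: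
--         grid, r, c = stack.pop()
--         if r >= len(grid):
--             continue
--         row_str = grid[r]
--         node = row_str[c]
--         last = not (r + 1 < len(grid))
--         if node == '^':
--             left = grid[:]
--             left[r] = row_str[:c] + "/" + row_str[c + 1:]
--             right = grid[:]
--             right[r] = row_str[:c] + "\\" + row_str[c + 1:]
--             if last:
--                 universes.append(left)
--                 universes.append(right)
--             else:
--                 stack.append((right, r + 1, c + 1))
--                 stack.append((left, r + 1, c - 1))
--         else:
--             mid = grid[:]
--             mid[r] = row_str[:c] + "|" + row_str[c + 1:]
--             if last:
--                 universes.append(mid)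
--             else:
--                 stack.append((mid, r + 1, c))
--     return universes
-- ===== Notes on version B (the rewrite author's own statement) =====
-- stated objective: alternative
-- what changed: Replaced A's recursive DFS with an iterative explicit LIFO stack of (grid,row,col) frames, pushing the right branch before the left so A's left-before-right preorder output is reproduced exactly (negative-index wraparound included).
-- outside the precondition, e.g. on build_universes(['ab'], -1, 0, []): A returns [['|b']], B returns [['|b']]
import Mathlib
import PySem

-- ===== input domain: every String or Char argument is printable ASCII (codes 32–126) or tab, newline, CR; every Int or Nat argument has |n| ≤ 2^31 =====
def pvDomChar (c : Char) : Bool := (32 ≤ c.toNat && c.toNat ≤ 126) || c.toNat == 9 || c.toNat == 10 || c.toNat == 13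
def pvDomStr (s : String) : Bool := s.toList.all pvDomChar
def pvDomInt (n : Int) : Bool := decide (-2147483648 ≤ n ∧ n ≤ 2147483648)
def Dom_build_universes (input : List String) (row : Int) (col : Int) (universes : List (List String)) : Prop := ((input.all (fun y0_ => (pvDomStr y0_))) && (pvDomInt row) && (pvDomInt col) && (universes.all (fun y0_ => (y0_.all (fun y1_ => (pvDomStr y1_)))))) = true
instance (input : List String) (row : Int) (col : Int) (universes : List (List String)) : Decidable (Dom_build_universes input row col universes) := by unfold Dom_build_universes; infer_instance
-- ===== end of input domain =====

-- B replaces A's recursion by an explicit LIFO stack of (grid,row,col) frames (same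
-- output value and the same appends to `universes`; the equivalence proved is about
-- the returned list, which is the caller-visible content of `universes`).

-- shared by both ports: the marked copy  grid[:] with  grid[row] = row_str[:col] + mark + row_str[col+1:]
-- (both Pythons build it with this exact expression)
def buMark (grid : List String) (row_str : String) (row col : Int) (mark : Char) : List String :=
  PySem.List.pySetD grid row
    (String.ofList (PySem.List.slice row_str.toList none (some col) ++
                mark :: PySem.List.slice row_str.toList (some (col + 1)) none))

-- termination helpers cited by the ports' decreasing_by (they must precede the ports)
lemma bu_len_buMark (g : List String) (rs : String) (r c : Int) (m : Char) :
    (buMark g rs r c m).length = g.length := by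
  simp [buMark, PySem.List.length_pySetD]

lemma bu_dec1 (L r : Int) (h : r + 1 < L) : (L - (r + 1)).toNat < (L - r).toNat := by omega

lemma bu_dec_exp (L r : Int) (h : r + 1 < L) :
    (L - (r + 1)).toNat + 1 = (L - r).toNat := by omega

lemma bu_pow_pos (k : Nat) : 0 < 3 ^ k := pow_pos (by norm_num) k

lemma bu_dec_skip (w S : Nat) (hw : 0 < w) : S < w + S := by omega

lemma bu_dec_two (L r : Int) (S : Nat) (h : r + 1 < L) :
    3 ^ ((L - (r + 1)).toNat) + (3 ^ ((L - (r + 1)).toNat) + S) < 3 ^ ((L - r).toNat) + S := by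
  rw [← bu_dec_exp L r h, pow_succ]
  have hp := bu_pow_pos ((L - (r + 1)).toNat)
  omega

lemma bu_dec_one (L r : Int) (S : Nat) (h : r + 1 < L) :
    3 ^ ((L - (r + 1)).toNat) + S < 3 ^ ((L - r).toNat) + S := by
  rw [← bu_dec_exp L r h, pow_succ]
  have hp := bu_pow_pos ((L - (r + 1)).toNat)
  omega

-- ===== PORT A =====
def build_universes (input : List String) (row : Int) (col : Int) (universes : List (List String)) : List (List String) :=
  if row < (input.length : Int) then
    match PySem.List.pyGet? input row with          -- input[row]; none = IndexError (excluded by Pre_)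
    | none => universes
    | some row_str =>
      match PySem.Str.pyGet? row_str col with       -- row_str[col]; none = IndexError (excluded by Pre_)
      | none => universes
      | some node =>
        if node = '^' then
          -- go left
          let acc1 :=
            if row + 1 < (input.length : Int) then
              build_universes (buMark input row_str row col '/') (row + 1) (col - 1) universes
            else universes ++ [buMark input row_str row col '/']
          -- go right
          if row + 1 < (input.length : Int) then
            build_universes (buMark input row_str row col '\\') (row + 1) (col + 1) acc1
          else acc1 ++ [buMark input row_str row col '\\']
        else
          -- go straight
          if row + 1 < (input.length : Int) then
            build_universes (buMark input row_str row col '|') (row + 1) col universes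
          else universes ++ [buMark input row_str row col '|']
  else universes
termination_by ((input.length : Int) - row).toNat
decreasing_by
  all_goals simp only [bu_len_buMark]
  all_goals exact bu_dec1 _ _ (by assumption)

-- ===== PORT B =====
-- the while-stack loop of Source B; the Lean list's head is the Python stack's top (pop = head,
-- push = cons; right pushed before left, as in Source B)
def build_universes_loop (stack : List (List String × Int × Int)) (universes : List (List String)) : List (List String) :=
  match stack with
  | [] => universes
  | (grid, r, c) :: rest =>
    if r < (grid.length : Int) then
      match PySem.List.pyGet? grid r with
      | none => build_universes_loop rest universes
      | some row_str =>
        match PySem.Str.pyGet? row_str c with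
        | none => build_universes_loop rest universes
        | some node =>
          if node = '^' then
            if r + 1 < (grid.length : Int) then
              build_universes_loop
                ((buMark grid row_str r c '/', r + 1, c - 1) ::
                 (buMark grid row_str r c '\\', r + 1, c + 1) :: rest) universes
            else
              build_universes_loop rest
                ((universes ++ [buMark grid row_str r c '/']) ++ [buMark grid row_str r c '\\'])
          else
            if r + 1 < (grid.length : Int) then
              build_universes_loop ((buMark grid row_str r c '|', r + 1, c) :: rest) universes
            else
              build_universes_loop rest (universes ++ [buMark grid row_str r c '|'])
    else build_universes_loop rest universes
termination_by (stack.map (fun f => 3 ^ (((f.1.length : Int) - f.2.1).toNat))).sum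
decreasing_by
  all_goals simp only [List.map_cons, List.sum_cons, bu_len_buMark]
  all_goals first
    | exact bu_dec_two _ _ _ (by assumption)
    | exact bu_dec_one _ _ _ (by assumption)
    | exact bu_dec_skip _ _ (bu_pow_pos _)

def build_universes_alt (input : List String) (row : Int) (col : Int) (universes : List (List String)) : List (List String) :=
  build_universes_loop [(input, row, col)] universes

-- ===== PRECONDITION & SPEC =====
-- helpers for Pre_: a reachability scan over the UNMODIFIED input rows (no grids, no
-- output, not the ports' recursion) computing which columns the splitting walk can
-- reach at each row. For a start row ≥ 0 each row is visited once and is still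
-- unmarked when read, so this characterises EXACTLY the inputs on which Python A
-- returns (A raises IndexError iff some reachable column leaves Python's index
-- range [-len, len) of its row).
def buStepCols (s : String) (c : Int) : Option (List Int) :=
  match PySem.Str.pyGet? s c with
  | none => none                                   -- row_str[c] would raise IndexError
  | some ch => some (if ch = '^' then [c - 1, c + 1] else [c])

def buReach : List String → List Int → Bool
  | [], _ => true
  | s :: rest, cs =>
    match cs.mapM (buStepCols s) with
    | none => false
    | some nss => buReach rest nss.flatten

-- Pre_ admits exactly the inputs on which Python A returns normally, except that it
-- also excludes negative start rows −len(input) ≤ row < 0: there Python's index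
-- wraparound makes the walk re-read rows it has already overwritten, so whether A
-- raises is not a closed-form condition on the input; where A does return there, B
-- returns the identical value (see the cited excluded examples).
def Pre_build_universes (input : List String) (row : Int) (col : Int) (universes : List (List String)) : Prop :=
  (input.length : Int) ≤ row ∨
    (0 ≤ row ∧ buReach (input.drop row.toNat) [col] = true)
instance (input : List String) (row : Int) (col : Int) (universes : List (List String)) : Decidable (Pre_build_universes input row col universes) := by unfold Pre_build_universes; infer_instance

def pvWitness_build_universes : List String × Int × Int × List (List String) := (["a^", "cdd", "eff"], 0, 1, [])

def Spec_build_universes (input : List String) (row : Int) (col : Int) (universes : List (List String)) (out : List (List String)) : Prop := out = build_universes_alt input row col universes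
instance (input : List String) (row : Int) (col : Int) (universes : List (List String)) (out : List (List String)) : Decidable (Spec_build_universes input row col universes out) := by unfold Spec_build_universes; infer_instance

-- ===== CLAIM (what is proved, stated in full; the proofs are below) =====
def Claim_equal_build_universes : Prop := ∀ (input : List String) (row : Int) (col : Int) (universes : List (List String)), Dom_build_universes input row col universes → Pre_build_universes input row col universes → Spec_build_universes input row col universes (build_universes input row col universes)

-- ===== LEMMAS AND PROOFS =====

-- processing one frame of B's stack is exactly one call of A, with the rest of the
-- stack processed afterwards on A's result
lemma loop_frame : ∀ (d : Nat) (g : List String) (r c : Int)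
    (rest : List (List String × Int × Int)) (u : List (List String)),
    (((g.length : Int) - r).toNat ≤ d) →
    build_universes_loop ((g, r, c) :: rest) u = build_universes_loop rest (build_universes g r c u) := by
  intro d
  induction d with
  | zero =>
    intro g r c rest u hle
    have hr : ¬ r < (g.length : Int) := by omega
    rw [build_universes_loop, build_universes]
    simp [hr]
  | succ d ih =>
    intro g r c rest u hle
    by_cases hr : r < (g.length : Int)
    · cases hg : PySem.List.pyGet? g r with
      | none =>
        rw [build_universes_loop, build_universes]
        simp [hr, hg]
      | some row_str =>
        cases hc : PySem.List.pyGet? row_str.toList c with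
        | none =>
          rw [build_universes_loop, build_universes]
          simp [hr, hg, PySem.Str.pyGet?, hc]
        | some node =>
          have hlen : ∀ m : Char, ((buMark g row_str r c m).length : Int) = (g.length : Int) := by
            intro m; simp [buMark, PySem.List.length_pySetD]
          by_cases hn : node = '^'
          · by_cases hnext : r + 1 < (g.length : Int)
            · rw [build_universes_loop, build_universes]
              simp [hr, hg, PySem.Str.pyGet?, hc, hn, hnext]
              rw [ih _ (r + 1) (c - 1) _ u (by rw [hlen]; omega),
                  ih _ (r + 1) (c + 1) _ _ (by rw [hlen]; omega)]
            · rw [build_universes_loop, build_universes]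
              simp [hr, hg, PySem.Str.pyGet?, hc, hn, hnext]
          · by_cases hnext : r + 1 < (g.length : Int)
            · rw [build_universes_loop, build_universes]
              simp [hr, hg, PySem.Str.pyGet?, hc, hn, hnext]
              rw [ih _ (r + 1) c _ u (by rw [hlen]; omega)]
            · rw [build_universes_loop, build_universes]
              simp [hr, hg, PySem.Str.pyGet?, hc, hn, hnext]
    · rw [build_universes_loop, build_universes]
      simp [hr]

-- ===== VERDICT (by name: the statement is the Claim_ definition above) =====
theorem build_universes_spec : Claim_equal_build_universes := by
  intro input row col universes _ _
  unfold Spec_build_universes build_universes_alt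
  rw [loop_frame (((input.length : Int) - row).toNat) input row col [] universes le_rfl,
      build_universes_loop]
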